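-- pv_equiv track=rewrite | github.com/thanhmuefatty07/supreme-system-v5 | src/utils/regression_tester.py | _generate_invalid_args_from_signature
-- ===== SOURCE A (Python) =====
-- from typing import Dict, List, Any, Optional, Set, Tuple, Callable
--
-- def _generate_invalid_args_from_signature(func: Dict[str, Any]) -> str:
--     """Generate invalid test arguments to test error handling."""
--     args = func.get('args', [])
--     arg_lines = []
--
--     for i, arg in enumerate(args):
--         arg_name = f'invalid_arg{i}'
--         arg_type = arg.get('type', 'str')
--
--         # Generate invalid values that should cause errors
--         if 'int' in arg_type.lower():
--             arg_lines.append(f'{arg_name} = "not_an_int"')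
--         elif 'float' in arg_type.lower():
--             arg_lines.append(f'{arg_name} = "not_a_float"')
--         elif 'bool' in arg_type.lower():
--             arg_lines.append(f'{arg_name} = "not_a_bool"')
--         elif 'str' in arg_type.lower():
--             arg_lines.append(f'{arg_name} = 123')  # Wrong type
--         else:
--             arg_lines.append(f'{arg_name} = None')  # Invalid value
--
--     return '\n    '.join(arg_lines)
-- ===== SOURCE B (Python) =====
-- # Staged-overwrite rewrite: instead of per-arg first-match dispatch, all literals start
-- # as 'None' and whole-list passes for each keyword (lowest precedence first) overwrite
-- # matching entries; the last pass to match wins, so 'int' > 'float' > 'bool' > 'str'.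
-- def _generate_invalid_args_from_signature(func):
--     types = [a.get('type', 'str').lower() for a in func.get('args', [])]
--     lits = ['None'] * len(types)
--     for kw, lit in [('str', '123'), ('bool', '"not_a_bool"'),
--                     ('float', '"not_a_float"'), ('int', '"not_an_int"')]:
--         lits = [lit if kw in t else old for t, old in zip(types, lits)]
--     return '\n    '.join(f'invalid_arg{i} = {v}' for i, v in enumerate(lits))
-- ===== Notes on version B (the rewrite author's own statement) =====
-- stated objective: alternative
-- what changed: Replaces per-argument first-match if/elif dispatch by staged whole-list passes: every literal starts as 'None' and one overwrite pass per keyword, applied in reverse precedence order, rewrites matching entries so the highest-precedence matching keyword wins.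
import Mathlib
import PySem

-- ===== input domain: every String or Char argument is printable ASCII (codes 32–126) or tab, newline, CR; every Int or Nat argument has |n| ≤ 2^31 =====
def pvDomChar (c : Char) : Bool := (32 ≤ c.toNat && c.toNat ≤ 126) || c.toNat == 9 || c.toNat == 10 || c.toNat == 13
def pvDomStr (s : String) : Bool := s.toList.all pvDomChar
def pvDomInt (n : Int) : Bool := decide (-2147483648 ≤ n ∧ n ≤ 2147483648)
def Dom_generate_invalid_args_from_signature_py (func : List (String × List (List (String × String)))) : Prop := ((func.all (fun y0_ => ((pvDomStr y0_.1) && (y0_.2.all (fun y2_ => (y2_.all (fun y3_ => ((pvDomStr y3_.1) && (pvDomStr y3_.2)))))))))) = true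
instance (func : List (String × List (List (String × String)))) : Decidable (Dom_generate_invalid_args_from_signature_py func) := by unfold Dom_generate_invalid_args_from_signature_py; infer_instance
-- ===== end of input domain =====

-- B replaces A's per-argument if/elif dispatch by staged whole-list overwrite passes (one per keyword,
-- in reverse precedence order, starting from all-'None'); same output, a different traversal.
-- ===== PORT A =====
def generate_invalid_args_from_signature_py (func : List (String × List (List (String × String)))) : String :=
  let args := PySem.Dict.getD ⟨func⟩ "args" []
  let arg_lines := (PySem.List.enumerate args 0).foldl (fun acc p =>
    let arg_name := "invalid_arg" ++ PySem.Int.toStr p.1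
    let arg_type := PySem.Dict.getD ⟨p.2⟩ "type" "str"
    if PySem.Str.isIn "int" (PySem.Str.lower arg_type) then acc ++ [arg_name ++ " = \"not_an_int\""]
    else if PySem.Str.isIn "float" (PySem.Str.lower arg_type) then acc ++ [arg_name ++ " = \"not_a_float\""]
    else if PySem.Str.isIn "bool" (PySem.Str.lower arg_type) then acc ++ [arg_name ++ " = \"not_a_bool\""]
    else if PySem.Str.isIn "str" (PySem.Str.lower arg_type) then acc ++ [arg_name ++ " = 123"]
    else acc ++ [arg_name ++ " = None"]) []
  PySem.Str.join "\n    " arg_lines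

-- ===== PORT B =====
def pvKwTable : List (String × String) :=
  [("str", "123"), ("bool", "\"not_a_bool\""), ("float", "\"not_a_float\""), ("int", "\"not_an_int\"")]

def generate_invalid_args_from_signature_py_alt (func : List (String × List (List (String × String)))) : String :=
  let types := (PySem.Dict.getD ⟨func⟩ "args" []).map
    (fun a => PySem.Str.lower (PySem.Dict.getD ⟨a⟩ "type" "str"))
  let lits0 := List.replicate types.length "None"
  let lits := pvKwTable.foldl (fun ls kv =>
    (types.zip ls).map (fun p => if PySem.Str.isIn kv.1 p.1 then kv.2 else p.2)) lits0
  PySem.Str.join "\n    " ((PySem.List.enumerate lits 0).map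
    (fun p => "invalid_arg" ++ PySem.Int.toStr p.1 ++ " = " ++ p.2))

-- ===== PRECONDITION & SPEC =====
def Spec_generate_invalid_args_from_signature_py (func : List (String × List (List (String × String)))) (out : String) : Prop := out = generate_invalid_args_from_signature_py_alt func
instance (func : List (String × List (List (String × String)))) (out : String) : Decidable (Spec_generate_invalid_args_from_signature_py func out) := by unfold Spec_generate_invalid_args_from_signature_py; infer_instance

-- ===== CLAIM =====
def Claim_equal_generate_invalid_args_from_signature_py : Prop := ∀ (func : List (String × List (List (String × String)))), Dom_generate_invalid_args_from_signature_py func → Spec_generate_invalid_args_from_signature_py func (generate_invalid_args_from_signature_py func)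

-- ===== LEMMAS AND PROOFS =====

-- one pass of B's staged overwrite, acting on a list already of the form types.map h
theorem pv_stage_map (types : List String) (h : String → String) (kw lit : String)
    :
    (types.zip (types.map h)).map
      (fun p => if PySem.Str.isIn kw p.1 then lit else p.2) =
    types.map (fun t => if PySem.Str.isIn kw t then lit else h t) := by
  induction types with
  | nil => rfl
  | cons x xs ih => simp only [List.map_cons, List.zip_cons_cons, ih]

-- enumerate commutes with map on the payload
theorem pv_enumerate_map {α β : Type} (f : α → β) (l : List α) (s : Int) :
    PySem.List.enumerate (l.map f) s =
      (PySem.List.enumerate l s).map (fun p => (p.1, f p.2)) := by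
  induction l generalizing s with
  | nil => rfl
  | cons x xs ih => simp [PySem.List.enumerate_cons, ih]

-- per-element agreement of A's if/elif line with B's staged literal
theorem pv_line_eq (p : Int × List (String × String)) :
    (let arg_name := "invalid_arg" ++ PySem.Int.toStr p.1
     let arg_type := PySem.Dict.getD ⟨p.2⟩ "type" "str"
     if PySem.Str.isIn "int" (PySem.Str.lower arg_type) then arg_name ++ " = \"not_an_int\""
     else if PySem.Str.isIn "float" (PySem.Str.lower arg_type) then arg_name ++ " = \"not_a_float\""
     else if PySem.Str.isIn "bool" (PySem.Str.lower arg_type) then arg_name ++ " = \"not_a_bool\""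
     else if PySem.Str.isIn "str" (PySem.Str.lower arg_type) then arg_name ++ " = 123"
     else arg_name ++ " = None") =
    ("invalid_arg" ++ PySem.Int.toStr p.1 ++ " = " ++
      (let t := PySem.Str.lower (PySem.Dict.getD ⟨p.2⟩ "type" "str")
       if PySem.Str.isIn "int" t then "\"not_an_int\""
       else if PySem.Str.isIn "float" t then "\"not_a_float\""
       else if PySem.Str.isIn "bool" t then "\"not_a_bool\""
       else if PySem.Str.isIn "str" t then "123" else "None")) := by
  dsimp only
  split_ifs <;> simp_all [String.append_assoc]

-- A's foldl-with-append is the map of its per-element line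
theorem pv_foldl_eq_map (l : List (Int × List (String × String))) (acc : List String) :
    l.foldl (fun acc p =>
      let arg_name := "invalid_arg" ++ PySem.Int.toStr p.1
      let arg_type := PySem.Dict.getD ⟨p.2⟩ "type" "str"
      if PySem.Str.isIn "int" (PySem.Str.lower arg_type) then acc ++ [arg_name ++ " = \"not_an_int\""]
      else if PySem.Str.isIn "float" (PySem.Str.lower arg_type) then acc ++ [arg_name ++ " = \"not_a_float\""]
      else if PySem.Str.isIn "bool" (PySem.Str.lower arg_type) then acc ++ [arg_name ++ " = \"not_a_bool\""]
      else if PySem.Str.isIn "str" (PySem.Str.lower arg_type) then acc ++ [arg_name ++ " = 123"]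
      else acc ++ [arg_name ++ " = None"]) acc =
    acc ++ l.map (fun p => "invalid_arg" ++ PySem.Int.toStr p.1 ++ " = " ++
      (let t := PySem.Str.lower (PySem.Dict.getD ⟨p.2⟩ "type" "str")
       if PySem.Str.isIn "int" t then "\"not_an_int\""
       else if PySem.Str.isIn "float" t then "\"not_a_float\""
       else if PySem.Str.isIn "bool" t then "\"not_a_bool\""
       else if PySem.Str.isIn "str" t then "123" else "None")) := by
  induction l generalizing acc with
  | nil => simp
  | cons x xs ih =>
    simp only [List.foldl_cons, List.map_cons]
    have hx := pv_line_eq x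
    split_ifs <;> simp_all

-- ===== VERDICT =====
theorem generate_invalid_args_from_signature_py_spec : Claim_equal_generate_invalid_args_from_signature_py := by
  intro func _
  unfold Spec_generate_invalid_args_from_signature_py
  unfold generate_invalid_args_from_signature_py generate_invalid_args_from_signature_py_alt
  dsimp only
  congr 1
  rw [pv_foldl_eq_map, List.nil_append, ← List.map_const]
  simp only [pvKwTable, List.foldl_cons, List.foldl_nil]
  rw [pv_stage_map, pv_stage_map, pv_stage_map, pv_stage_map, List.map_map, pv_enumerate_map,
    List.map_map]
  apply List.map_congr_left
  intro p _
  simp [Function.comp, Function.const]
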